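-- pv_equiv track=rewrite | github.com/mjjunng/repo | programmers/mjjunng/week7/인사고과.py | solution
-- ===== SOURCE A (Python) =====
-- def solution(scores):
--     answer = 0
--     lst = []
--     tmp = scores[:]
--     tmp.sort(key=lambda x:(x[0], x[1]))
--     s = tmp[-1]     # 근무 태도가 가장 높은 사람
--
--     tmp.sort(key=lambda x:(x[1], x[0]))
--     s1 = tmp[-1]    # 동료 평가가 가장 높은 사람
--
--     # 인센티브 받을 수 있는 직원만 리스트에 추가
--     for i in range(len(scores)):
--         a = scores[i][0]
--         b = scores[i][1]
--         if (a < s[0] and b < s[1]) or (a < s1[0] and b < s1[1]):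
--             if i == 0:
--                 return -1
--             continue
--
--         lst.append([a+b, i])
--
--     # 등수 매기기
--     lst.sort(key=lambda x:x[0], reverse=True)
--
--     if lst[0][1] == 0:
--         return 1
--     else:
--         score = lst[0][0]
--         rating = 1
--         cnt = 0
--         for i in range(1, len(lst)):
--             if score == lst[i][0]:
--                 cnt += 1
--             else:
--                 rating += cnt + 1
--                 cnt = 0
--                 score = lst[i][0]
--
--             if lst[i][1] == 0:
--                     return rating
-- ===== SOURCE B (Python) =====
-- def solution(scores):
--     # pivot keys: the lexicographically greatest (attitude, peer) and (peer, attitude) pairs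
--     p1 = max((x[0], x[1]) for x in scores)
--     p2 = max((x[1], x[0]) for x in scores)
--
--     def dominated(x):
--         return (x[0] < p1[0] and x[1] < p1[1]) or (x[0] < p2[1] and x[1] < p2[0])
--
--     if dominated(scores[0]):
--         return -1
--     my = scores[0][0] + scores[0][1]
--     return 1 + sum(1 for x in scores if not dominated(x) and x[0] + x[1] > my)
-- ===== Notes on version B (the rewrite author's own statement) =====
-- stated objective: simpler
-- what changed: B replaces A's candidate-list construction, descending sort and tie-group rank scan by a single counting pass: after computing the two pivots (as lex-max key pairs instead of sort-then-last) it returns -1 if employee 0 is dominated, else 1 plus the number of non-dominated employees whose combined score strictly exceeds employee 0's.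
import Mathlib
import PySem

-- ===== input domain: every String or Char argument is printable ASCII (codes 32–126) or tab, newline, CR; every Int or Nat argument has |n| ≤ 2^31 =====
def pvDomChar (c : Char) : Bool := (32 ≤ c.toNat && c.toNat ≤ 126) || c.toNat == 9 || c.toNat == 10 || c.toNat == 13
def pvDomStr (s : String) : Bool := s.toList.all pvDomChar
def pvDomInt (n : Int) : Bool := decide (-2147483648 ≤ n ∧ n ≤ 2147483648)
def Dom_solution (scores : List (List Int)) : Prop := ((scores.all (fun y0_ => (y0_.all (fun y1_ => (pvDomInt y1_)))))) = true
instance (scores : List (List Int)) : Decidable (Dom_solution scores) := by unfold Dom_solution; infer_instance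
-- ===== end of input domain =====

-- B replaces A's list build + descending sort + tie-group scan by pivot lex-max pairs and one counting pass (objective: simpler).
-- ===== PORT A =====
def solLoopA (s s1 : List Int) (i : Int) (rows : List (List Int)) (lst : List (Int × Int)) : Option (List (Int × Int)) :=
  match rows with
  | [] => some lst
  | x :: rest =>
    let a := PySem.List.pyGetD x 0 0
    let b := PySem.List.pyGetD x 1 0
    if (a < PySem.List.pyGetD s 0 0 ∧ b < PySem.List.pyGetD s 1 0) ∨
       (a < PySem.List.pyGetD s1 0 0 ∧ b < PySem.List.pyGetD s1 1 0) then
      if i = 0 then none else solLoopA s s1 (i + 1) rest lst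
    else solLoopA s s1 (i + 1) rest (lst ++ [(a + b, i)])

def solRankA (rest : List (Int × Int)) (score rating cnt : Int) : Int :=
  match rest with
  | [] => 0      -- Python's loop ends and the function returns None; unreachable for inputs in Pre_
  | p :: tl =>
    let score' := if p.1 = score then score else p.1
    let rating' := if p.1 = score then rating else rating + cnt + 1
    let cnt' := if p.1 = score then cnt + 1 else 0
    if p.2 = 0 then rating' else solRankA tl score' rating' cnt'

def solution (scores : List (List Int)) : Int :=
  let tmp := PySem.List.sorted2 scores (fun x => PySem.List.pyGetD x 0 0) (fun x => PySem.List.pyGetD x 1 0)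
  let s := PySem.List.pyGetD tmp (-1) []
  let tmp2 := PySem.List.sorted2 tmp (fun x => PySem.List.pyGetD x 1 0) (fun x => PySem.List.pyGetD x 0 0)
  let s1 := PySem.List.pyGetD tmp2 (-1) []
  match solLoopA s s1 0 scores [] with
  | none => -1
  | some lst =>
    match PySem.List.sorted lst (fun p => p.1) true with
    | [] => 0   -- Python's lst[0] would raise IndexError; unreachable for inputs in Pre_
    | h :: t => if h.2 = 0 then 1 else solRankA t h.1 1 0

-- ===== PORT B =====
-- Python tuple comparison is lexicographic: max over (a, b) tuples is max? with the Lex (Int × Int) order.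
def solDomB (p1 p2 : Lex (Int × Int)) (x : List Int) : Bool :=
  (decide (PySem.List.pyGetD x 0 0 < (ofLex p1).1) && decide (PySem.List.pyGetD x 1 0 < (ofLex p1).2)) ||
  (decide (PySem.List.pyGetD x 0 0 < (ofLex p2).2) && decide (PySem.List.pyGetD x 1 0 < (ofLex p2).1))

def solution_alt (scores : List (List Int)) : Int :=
  match PySem.List.max? (scores.map (fun x => toLex (PySem.List.pyGetD x 0 0, PySem.List.pyGetD x 1 0))) (fun p => p),
        PySem.List.max? (scores.map (fun x => toLex (PySem.List.pyGetD x 1 0, PySem.List.pyGetD x 0 0))) (fun p => p) with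
  | some p1, some p2 =>
    if solDomB p1 p2 (PySem.List.pyGetD scores 0 []) then -1
    else
      let my := PySem.List.pyGetD (PySem.List.pyGetD scores 0 []) 0 0 +
                PySem.List.pyGetD (PySem.List.pyGetD scores 0 []) 1 0
      1 + (scores.countP (fun x => !solDomB p1 p2 x &&
             decide (my < PySem.List.pyGetD x 0 0 + PySem.List.pyGetD x 1 0)) : Int)
  | _, _ => 0    -- max() raises ValueError on empty scores; unreachable for inputs in Pre_

-- ===== PRECONDITION & SPEC =====
-- Pre_ excludes exactly the inputs where the Python A raises: empty scores (IndexError on tmp[-1])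
-- and rows of length < 2 (IndexError on x[0] / x[1]).
def Pre_solution (scores : List (List Int)) : Prop :=
  scores ≠ [] ∧ ∀ x ∈ scores, 2 ≤ x.length
instance (scores : List (List Int)) : Decidable (Pre_solution scores) := by unfold Pre_solution; infer_instance
def pvWitness_solution : List (List Int) := [[2, 2], [1, 4], [4, 1], [3, 3]]
def Spec_solution (scores : List (List Int)) (out : Int) : Prop := out = solution_alt scores
instance (scores : List (List Int)) (out : Int) : Decidable (Spec_solution scores out) := by unfold Spec_solution; infer_instance

-- ===== CLAIM (what is proved, stated in full; the proofs are below) =====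
def Claim_equal_solution : Prop := ∀ (scores : List (List Int)), Dom_solution scores → Pre_solution scores → Spec_solution scores (solution scores)

-- ===== LEMMAS AND PROOFS =====

theorem before_lex (a b c d : Int) :
    (decide (a < b) || (!decide (b < a) && decide (c < d)))
    = decide (toLex (a, c) < toLex (b, d)) := by
  rw [Bool.eq_iff_iff]
  simp [Prod.Lex.toLex_lt_toLex]
  omega

theorem sorted2_eq_sorted_lex (xs : List (List Int)) (k1 k2 : List Int → Int) :
    PySem.List.sorted2 xs k1 k2
    = PySem.List.sorted xs (fun x => toLex (k1 x, k2 x)) false := by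
  rw [PySem.List.sorted_eq_foldl_insertBy]
  unfold PySem.List.sorted2
  simp only [if_neg (by decide : ¬ (false = true))]
  congr 1
  funext acc x
  congr 1
  funext p q
  exact before_lex (k1 p) (k1 q) (k2 p) (k2 q)

theorem pyGetD_neg_one {α : Type} (l : List α) (hl : l ≠ []) (d : α) :
    PySem.List.pyGetD l (-1) d = l.getLast hl := by
  have hlen : 1 ≤ l.length := List.length_pos_iff.mpr hl
  simp only [PySem.List.pyGetD, PySem.List.pyGet?, PySem.List.pyIdx?]
  rw [if_neg (by omega), if_pos (by omega)]
  have h1 : (-(-1:Int)).toNat = 1 := by decide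
  rw [h1, List.getLast_eq_getElem]
  simp [Option.bind, List.getElem?_eq_getElem (by omega : l.length - 1 < l.length)]

theorem getLast_key_max {α κ : Type} [LinearOrder κ] (key : α → κ) :
    ∀ (l : List α), l.Pairwise (fun a b => key a ≤ key b) → ∀ (hne : l ≠ []),
      ∀ y ∈ l, key y ≤ key (l.getLast hne) := by
  intro l
  induction l with
  | nil => intro _ hne; exact absurd rfl hne
  | cons x t ih =>
    intro h hne y hy
    rcases List.pairwise_cons.mp h with ⟨hx, ht⟩
    cases t with
    | nil => simp at hy; simp [hy]
    | cons z t' =>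
      rw [List.getLast_cons (by simp)]
      rcases hy with _ | hy
      · exact hx _ (List.getLast_mem _)
      · exact ih ht (by simp) y (by assumption)

theorem pivot_eq (xs ys : List (List Int)) (K : List Int → Lex (Int × Int)) (m : Lex (Int × Int))
    (hmem : ∀ a, a ∈ ys ↔ a ∈ xs) (hne : PySem.List.sorted ys K false ≠ [])
    (hmax : PySem.List.max? (xs.map K) (fun p => p) = some m) :
    K ((PySem.List.sorted ys K false).getLast hne) = m := by
  have hPW : (PySem.List.sorted ys K false).Pairwise (fun a b => K a ≤ K b) :=
    PySem.List.sorted_pairwise ys K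
  have hlast_mem : (PySem.List.sorted ys K false).getLast hne ∈ ys :=
    (PySem.List.mem_sorted ys K false _).mp (List.getLast_mem hne)
  have h1 : K ((PySem.List.sorted ys K false).getLast hne) ≤ m :=
    PySem.List.max?_isMax hmax _ (List.mem_map_of_mem ((hmem _).mp hlast_mem))
  have h2 : m ≤ K ((PySem.List.sorted ys K false).getLast hne) := by
    obtain ⟨a, ha, hKa⟩ := List.mem_map.mp (PySem.List.max?_mem hmax)
    have haL : a ∈ PySem.List.sorted ys K false :=
      (PySem.List.mem_sorted ys K false a).mpr ((hmem a).mpr ha)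
    exact hKa ▸ getLast_key_max K _ hPW hne a haL
  exact le_antisymm h1 h2

theorem countP_gt_add_eq (c : Int) :
    ∀ l : List (Int × Int), (∀ p ∈ l, c ≤ p.1) →
      l.countP (fun p => decide (c < p.1)) + l.countP (fun p => decide (p.1 = c)) = l.length := by
  intro l
  induction l with
  | nil => simp
  | cons x t ih =>
    intro hmem
    have hx := hmem x (by simp)
    have ht := ih (fun p hp => hmem p (by simp [hp]))
    rw [List.countP_cons, List.countP_cons]
    by_cases hcx : c < x.1 <;> by_cases hex : x.1 = c <;> simp [hcx, hex] <;> omega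

def solCond (s s1 x : List Int) : Bool :=
  decide ((PySem.List.pyGetD x 0 0 < PySem.List.pyGetD s 0 0 ∧ PySem.List.pyGetD x 1 0 < PySem.List.pyGetD s 1 0) ∨
          (PySem.List.pyGetD x 0 0 < PySem.List.pyGetD s1 0 0 ∧ PySem.List.pyGetD x 1 0 < PySem.List.pyGetD s1 1 0))

theorem loopA_pos (s s1 : List Int) :
    ∀ (rows : List (List Int)) (i : Int) (lst : List (Int × Int)), 1 ≤ i →
    ∃ tl, solLoopA s s1 i rows lst = some (lst ++ tl) ∧
      tl.map Prod.fst = (rows.filter (fun x => !solCond s s1 x)).map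
        (fun x => PySem.List.pyGetD x 0 0 + PySem.List.pyGetD x 1 0) ∧
      ∀ p ∈ tl, p.2 ≠ 0 := by
  intro rows
  induction rows with
  | nil => intro i lst hi; exact ⟨[], by simp [solLoopA], by simp, by simp⟩
  | cons x rest ih =>
    intro i lst hi
    by_cases hc : solCond s s1 x = true
    · obtain ⟨tl, h1, h2, h3⟩ := ih (i + 1) lst (by omega)
      refine ⟨tl, ?_, ?_, h3⟩
      · rw [solLoopA, if_pos (by simpa [solCond] using hc), if_neg (by omega)]
        exact h1
      · rw [List.filter_cons_of_neg (by simp [hc])]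
        exact h2
    · obtain ⟨tl, h1, h2, h3⟩ := ih (i + 1) (lst ++ [(PySem.List.pyGetD x 0 0 + PySem.List.pyGetD x 1 0, i)]) (by omega)
      refine ⟨(PySem.List.pyGetD x 0 0 + PySem.List.pyGetD x 1 0, i) :: tl, ?_, ?_, ?_⟩
      · rw [solLoopA, if_neg (by simpa [solCond] using hc)]
        rw [h1, List.append_assoc]
        rfl
      · rw [List.filter_cons_of_pos (by simp [hc]), List.map_cons, h2]
        rfl
      · intro p hp
        rcases List.mem_cons.mp hp with rfl | hp
        · simp; omega
        · exact h3 p hp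

theorem rankScan (my : Int) :
    ∀ (rest pre : List (Int × Int)) (lastEl : Int × Int),
      (pre ++ lastEl :: rest).Pairwise (fun a b => b.1 ≤ a.1) →
      (my, 0) ∈ rest →
      (∀ p ∈ pre ++ lastEl :: rest, p.2 = 0 → p = (my, 0)) →
      solRankA rest lastEl.1 (((pre ++ [lastEl]).countP (fun p => decide (lastEl.1 < p.1)) : Int) + 1)
                             (((pre ++ [lastEl]).countP (fun p => decide (p.1 = lastEl.1)) : Int) - 1)
      = ((pre ++ lastEl :: rest).countP (fun p => decide (my < p.1)) : Int) + 1 := by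
  intro rest
  induction rest with
  | nil => intro pre lastEl _ hmem _; simp at hmem
  | cons x rest' ih =>
    intro pre lastEl hPW hmem hzero
    obtain ⟨hpre, hsuf, hcross⟩ := List.pairwise_append.mp hPW
    obtain ⟨hlastR, hsuf'⟩ := List.pairwise_cons.mp hsuf
    obtain ⟨hxR, hsuf''⟩ := List.pairwise_cons.mp hsuf'
    have hxle : x.1 ≤ lastEl.1 := hlastR x (by simp)
    have hrest' : ∀ q ∈ rest', q.1 ≤ x.1 := hxR
    have h1 : ∀ p ∈ pre ++ [lastEl], lastEl.1 ≤ p.1 := by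
      intro p hp
      rcases List.mem_append.mp hp with hp | hp
      · exact hcross p hp lastEl (by simp)
      · simp at hp; simp [hp]
    have hA1 : ((pre ++ [lastEl] ++ [x]).countP (fun p => decide (x.1 < p.1)) : Int)
        = (if x.1 = lastEl.1
           then ((pre ++ [lastEl]).countP (fun p => decide (lastEl.1 < p.1)) : Int)
           else ((pre ++ [lastEl]).length : Int)) := by
      rw [List.countP_append]
      split_ifs with he
      · simp [he]
      · have hlt : x.1 < lastEl.1 := lt_of_le_of_ne hxle he
        have hfull : (pre ++ [lastEl]).countP (fun p => decide (x.1 < p.1)) = (pre ++ [lastEl]).length := by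
          apply List.countP_eq_length.mpr
          intro p hp
          simp only [decide_eq_true_eq]
          exact lt_of_lt_of_le hlt (h1 p hp)
        simp [hfull]
    have hA2 : ((pre ++ [lastEl] ++ [x]).countP (fun p => decide (p.1 = x.1)) : Int)
        = (if x.1 = lastEl.1
           then ((pre ++ [lastEl]).countP (fun p => decide (p.1 = lastEl.1)) : Int) + 1
           else 1) := by
      rw [List.countP_append]
      split_ifs with he
      · simp [he]
      · have hlt : x.1 < lastEl.1 := lt_of_le_of_ne hxle he
        have hzeroc : (pre ++ [lastEl]).countP (fun p => decide (p.1 = x.1)) = 0 := by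
          apply List.countP_eq_zero.mpr
          intro p hp
          simp only [decide_eq_true_eq]
          have := h1 p hp
          omega
        simp [hzeroc]
    have hlen : ((pre ++ [lastEl]).countP (fun p => decide (lastEl.1 < p.1)) : Int)
        + ((pre ++ [lastEl]).countP (fun p => decide (p.1 = lastEl.1)) : Int)
        = ((pre ++ [lastEl]).length : Int) := by
      exact_mod_cast congrArg (Nat.cast (R := Int)) (countP_gt_add_eq lastEl.1 (pre ++ [lastEl]) h1)
    rw [solRankA]
    by_cases hx0 : x.2 = 0
    · have hxmy : x = (my, 0) := hzero x (by simp) hx0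
      have hxmy1 : x.1 = my := by rw [hxmy]
      simp only [hx0, if_true]
      have hrest0 : (rest'.countP (fun p => decide (my < p.1)) : Int) = 0 := by
        have h0 : rest'.countP (fun p => decide (my < p.1)) = 0 := by
          apply List.countP_eq_zero.mpr
          intro q hq
          simp only [decide_eq_true_eq]
          have := hrest' q hq
          omega
        exact_mod_cast h0
      have hsplit : ((pre ++ lastEl :: x :: rest').countP (fun p => decide (my < p.1)) : Int)
          = ((pre ++ [lastEl] ++ [x]).countP (fun p => decide (my < p.1)) : Int) := by
        have hre : pre ++ lastEl :: x :: rest' = (pre ++ [lastEl] ++ [x]) ++ rest' := by simp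
        rw [hre, List.countP_append]
        push_cast
        omega
      rw [hsplit, ← hxmy1]
      by_cases he : x.1 = lastEl.1
      · simp only [if_pos he]
        have hh := hA1
        rw [if_pos he] at hh
        omega
      · simp only [if_neg he]
        have hh := hA1
        rw [if_neg he] at hh
        omega
    · simp only [if_neg hx0]
      have hxmem : (my, 0) ∈ rest' := by
        rcases List.mem_cons.mp hmem with heq | hm
        · exact absurd (congrArg Prod.snd heq).symm hx0
        · exact hm
      have hPW' : ((pre ++ [lastEl]) ++ x :: rest').Pairwise (fun a b => b.1 ≤ a.1) := by
        rw [List.append_assoc]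
        simpa using hPW
      have hzero' : ∀ p ∈ (pre ++ [lastEl]) ++ x :: rest', p.2 = 0 → p = (my, 0) := by
        intro p hp
        apply hzero
        rw [List.append_assoc] at hp
        simpa using hp
      have hIH := ih (pre ++ [lastEl]) x hPW' hxmem hzero'
      have hRHS : ((pre ++ [lastEl] ++ x :: rest').countP (fun p => decide (my < p.1)) : Int)
          = ((pre ++ lastEl :: x :: rest').countP (fun p => decide (my < p.1)) : Int) := by
        rw [List.append_assoc]
        simp
      rw [hRHS] at hIH
      rw [← hIH]
      by_cases he : x.1 = lastEl.1
      · simp only [if_pos he]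
        congr 1
        · rw [he]
        · rw [hA1, if_pos he]
        · rw [hA2, if_pos he]; omega
      · simp only [if_neg he]
        congr 1
        · rw [hA1, if_neg he]; omega
        · rw [hA2, if_neg he]; omega


theorem core (s s1 : List Int) (p1 p2 : Lex (Int × Int))
    (hs : (PySem.List.pyGetD s 0 0, PySem.List.pyGetD s 1 0) = ofLex p1)
    (hs1 : (PySem.List.pyGetD s1 1 0, PySem.List.pyGetD s1 0 0) = ofLex p2)
    (x0 : List Int) (rows : List (List Int)) :
    (match solLoopA s s1 0 (x0 :: rows) [] with
     | none => (-1 : Int)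
     | some lst =>
       match PySem.List.sorted lst (fun p => p.1) true with
       | [] => 0
       | h :: t => if h.2 = 0 then 1 else solRankA t h.1 1 0)
    = (if solDomB p1 p2 x0 then -1
       else 1 + ((x0 :: rows).countP (fun x => !solDomB p1 p2 x &&
            decide ((PySem.List.pyGetD x0 0 0 + PySem.List.pyGetD x0 1 0) < PySem.List.pyGetD x 0 0 + PySem.List.pyGetD x 1 0)) : Int)) := by
  have hs0 : PySem.List.pyGetD s 0 0 = (ofLex p1).1 := congrArg Prod.fst hs
  have hs01 : PySem.List.pyGetD s 1 0 = (ofLex p1).2 := congrArg Prod.snd hs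
  have hs10 : PySem.List.pyGetD s1 1 0 = (ofLex p2).1 := congrArg Prod.fst hs1
  have hs11 : PySem.List.pyGetD s1 0 0 = (ofLex p2).2 := congrArg Prod.snd hs1
  have hcond : ∀ x, solCond s s1 x = solDomB p1 p2 x := by
    intro x
    simp only [solCond, solDomB, hs0, hs01, hs10, hs11]
    rw [Bool.eq_iff_iff]
    simp
  set my : Int := PySem.List.pyGetD x0 0 0 + PySem.List.pyGetD x0 1 0 with hmy
  by_cases hdom : solCond s s1 x0 = true
  · rw [solLoopA, if_pos (by simpa [solCond] using hdom), if_pos rfl]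
    rw [if_pos (by rw [← hcond]; exact hdom)]
  · rw [solLoopA, if_neg (by simpa [solCond] using hdom)]
    rw [if_neg (by rw [← hcond]; simpa using hdom)]
    obtain ⟨tl, hloop, hmap, htl⟩ := loopA_pos s s1 rows 1 ([] ++ [(my, 0)]) (by omega)
    norm_num at hloop
    simp only [List.nil_append, ← hmy]
    norm_num
    rw [hloop]
    have hcons : (my, (0:Int)) :: tl ≠ [] := by simp
    have HB : ((x0 :: rows).countP (fun x => !solDomB p1 p2 x &&
          decide (my < PySem.List.pyGetD x 0 0 + PySem.List.pyGetD x 1 0)))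
        = ((my, (0:Int)) :: tl).countP (fun p => decide (my < p.1)) := by
      have e1 : ((my, (0:Int)) :: tl).countP (fun p => decide (my < p.1))
          = tl.countP (fun p => decide (my < p.1)) := by
        simp
      have e2 : (x0 :: rows).countP (fun x => !solDomB p1 p2 x &&
            decide (my < PySem.List.pyGetD x 0 0 + PySem.List.pyGetD x 1 0))
          = rows.countP (fun x => !solDomB p1 p2 x &&
            decide (my < PySem.List.pyGetD x 0 0 + PySem.List.pyGetD x 1 0)) := by
        rw [List.countP_cons]
        simp [← hmy]
      have e3 : tl.countP (fun p => decide (my < p.1))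
          = (tl.map Prod.fst).countP (fun v => decide (my < v)) := by
        rw [List.countP_map]
        rfl
      have e4 : ((rows.filter (fun x => !solCond s s1 x)).map
            (fun x => PySem.List.pyGetD x 0 0 + PySem.List.pyGetD x 1 0)).countP (fun v => decide (my < v))
          = (rows.filter (fun x => !solCond s s1 x)).countP
            (fun x => decide (my < PySem.List.pyGetD x 0 0 + PySem.List.pyGetD x 1 0)) := by
        rw [List.countP_map]
        rfl
      have e5 : (rows.filter (fun x => !solCond s s1 x)).countP
            (fun x => decide (my < PySem.List.pyGetD x 0 0 + PySem.List.pyGetD x 1 0))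
          = rows.countP (fun x => decide (my < PySem.List.pyGetD x 0 0 + PySem.List.pyGetD x 1 0)
              && !solCond s s1 x) := List.countP_filter
      have e6 : rows.countP (fun x => decide (my < PySem.List.pyGetD x 0 0 + PySem.List.pyGetD x 1 0)
              && !solCond s s1 x)
          = rows.countP (fun x => !solDomB p1 p2 x &&
              decide (my < PySem.List.pyGetD x 0 0 + PySem.List.pyGetD x 1 0)) := by
        apply List.countP_congr
        intro x _
        rw [hcond x, Bool.and_comm]
      rw [e1, e2, e3, hmap, e4, e5, e6]
    show (match PySem.List.sorted ((my, (0:Int)) :: tl) (fun p => p.1) true with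
          | [] => (0:Int)
          | h :: t => if h.2 = 0 then 1 else solRankA t h.1 1 0)
        = 1 + ((x0 :: rows).countP (fun x => !solDomB p1 p2 x &&
            decide (my < PySem.List.pyGetD x 0 0 + PySem.List.pyGetD x 1 0)) : Int)
    rcases hsrt : PySem.List.sorted ((my, (0:Int)) :: tl) (fun p => p.1) true with _ | ⟨h, t⟩
    · exact absurd ((PySem.List.sorted_eq_nil_iff _ _ _).mp hsrt) hcons
    · show (if h.2 = 0 then (1:Int) else solRankA t h.1 1 0)
          = 1 + ((x0 :: rows).countP (fun x => !solDomB p1 p2 x &&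
              decide (my < PySem.List.pyGetD x 0 0 + PySem.List.pyGetD x 1 0)) : Int)
      have hperm : ((h :: t) : List (Int × Int)).Perm ((my, 0) :: tl) := by
        rw [← hsrt]; exact PySem.List.sorted_perm _ _ _
      have hPW : ((h :: t) : List (Int × Int)).Pairwise (fun a b => b.1 ≤ a.1) := by
        rw [← hsrt]; exact PySem.List.sorted_pairwise_rev _ _
      have hzero : ∀ p ∈ (h :: t), p.2 = 0 → p = (my, 0) := by
        intro p hp hp2
        rcases List.mem_cons.mp (hperm.mem_iff.mp hp) with h' | h'
        · exact h'
        · exact absurd hp2 (htl p h')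
      have hmymem : ((my, (0:Int))) ∈ h :: t := hperm.mem_iff.mpr (by simp)
      have hcnteq : ((h :: t) : List (Int × Int)).countP (fun p => decide (my < p.1))
          = ((my, (0:Int)) :: tl).countP (fun p => decide (my < p.1)) := hperm.countP_eq _
      by_cases hz : h.2 = 0
      · rw [if_pos hz]
        have hhmy : h = (my, 0) := hzero h (by simp) hz
        have hmax : ∀ y ∈ ((my, (0:Int)) :: tl), y.1 ≤ h.1 :=
          fun y hy => PySem.List.key_head_sorted_rev_ge _ _ hsrt y hy
        have hc0 : ((my, (0:Int)) :: tl).countP (fun p => decide (my < p.1)) = 0 := by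
          apply List.countP_eq_zero.mpr
          intro p hp
          have := hmax p hp
          rw [hhmy] at this
          simp only [decide_eq_true_eq]
          omega
        rw [← HB] at hc0
        rw [hc0]
        norm_num
      · rw [if_neg hz]
        have hmemt : ((my, (0:Int))) ∈ t := by
          rcases List.mem_cons.mp hmymem with h' | h'
          · exact absurd (congrArg Prod.snd h'.symm) hz
          · exact h'
        have hscan := rankScan my t [] h hPW hmemt (by simpa using hzero)
        simp only [List.nil_append, List.countP_cons] at hscan
        norm_num at hscan
        rw [hscan]
        have hEq : (((x0 :: rows).countP (fun x => !solDomB p1 p2 x &&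
              decide (my < PySem.List.pyGetD x 0 0 + PySem.List.pyGetD x 1 0))) : Int)
            = (((h :: t) : List (Int × Int)).countP (fun p => decide (my < p.1)) : Int) := by
          rw [HB, ← hcnteq]
        rw [hEq, List.countP_cons]
        by_cases hmh : my < h.1 <;> simp [hmh] <;> omega

theorem main_lemma : ∀ (scores : List (List Int)), Pre_solution scores → solution scores = solution_alt scores := by
  intro scores hpre
  obtain ⟨hne, hlen2⟩ := hpre
  rcases hm1 : PySem.List.max? (scores.map (fun x => toLex (PySem.List.pyGetD x 0 0, PySem.List.pyGetD x 1 0))) (fun p => p) with _ | p1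
  · exact absurd (List.map_eq_nil_iff.mp ((PySem.List.max?_eq_none_iff _ _).mp hm1)) hne
  rcases hm2 : PySem.List.max? (scores.map (fun x => toLex (PySem.List.pyGetD x 1 0, PySem.List.pyGetD x 0 0))) (fun p => p) with _ | p2
  · exact absurd (List.map_eq_nil_iff.mp ((PySem.List.max?_eq_none_iff _ _).mp hm2)) hne
  have hL1ne : PySem.List.sorted scores (fun x => toLex (PySem.List.pyGetD x 0 0, PySem.List.pyGetD x 1 0)) false ≠ [] := by
    rw [Ne, PySem.List.sorted_eq_nil_iff]; exact hne
  have hL2ne : PySem.List.sorted (PySem.List.sorted scores (fun x => toLex (PySem.List.pyGetD x 0 0, PySem.List.pyGetD x 1 0)) false)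
      (fun x => toLex (PySem.List.pyGetD x 1 0, PySem.List.pyGetD x 0 0)) false ≠ [] := by
    rw [Ne, PySem.List.sorted_eq_nil_iff]; exact hL1ne
  have hp1 := pivot_eq scores scores _ p1 (fun a => Iff.rfl) hL1ne hm1
  have hp2 := pivot_eq scores _ _ p2
    (fun a => PySem.List.mem_sorted scores _ false a) hL2ne hm2
  have hs : (PySem.List.pyGetD ((PySem.List.sorted scores (fun x => toLex (PySem.List.pyGetD x 0 0, PySem.List.pyGetD x 1 0)) false).getLast hL1ne) 0 0,
             PySem.List.pyGetD ((PySem.List.sorted scores (fun x => toLex (PySem.List.pyGetD x 0 0, PySem.List.pyGetD x 1 0)) false).getLast hL1ne) 1 0) = ofLex p1 := by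
    have := congrArg ofLex hp1
    simpa using this
  have hs1' := congrArg ofLex hp2
  simp only [ofLex_toLex] at hs1'
  cases scores with
  | nil => exact absurd rfl hne
  | cons x0 rows =>
    rw [solution, solution_alt, hm1, hm2]
    rw [sorted2_eq_sorted_lex, sorted2_eq_sorted_lex]
    rw [pyGetD_neg_one _ hL1ne, pyGetD_neg_one _ hL2ne]
    have hget0 : PySem.List.pyGetD (x0 :: rows) 0 ([] : List Int) = x0 := by
      simp [PySem.List.pyGetD, PySem.List.pyGet?, PySem.List.pyIdx?]
    rw [hget0]
    exact core _ _ p1 p2 hs hs1' x0 rows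

-- ===== VERDICT (by name: the statement is the Claim_ definition above) =====
theorem solution_spec : Claim_equal_solution := by
  intro scores _ hpre; exact main_lemma scores hpre
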